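-- pv_equiv track=rewrite | github.com/kolavtz/molten-rocket-quantum_scanner | scripts/migrate_mysql_to_supabase.py | _ordered_tables
-- ===== SOURCE A (Python) =====
-- def _ordered_tables(existing: set[str]) -> list[str]:
--     preferred = [
--         "users",
--         "scans",
--         "assets",
--         "asset_dns_records",
--         "discovery_domains",
--         "discovery_ips",
--         "discovery_software",
--         "discovery_ssl",
--         "certificates",
--         "pqc_classification",
--         "cbom_summary",
--         "cbom_entries",
--         "compliance_scores",
--         "cyber_rating",
--         "findings",
--         "asset_metrics",
--         "org_pqc_metrics",
--         "cert_expiry_buckets",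
--         "tls_compliance_scores",
--         "digital_labels",
--         "audit_log_chain",
--         "audit_logs",
--         "report_schedules",
--         "cbom_reports",
--     ]
--     ordered = [t for t in preferred if t in existing]
--     ordered.extend(sorted(existing - set(ordered)))
--     return ordered
-- ===== SOURCE B (Python) =====
-- def _ordered_tables(existing: set[str]) -> list[str]:
--     preferred = [
--         "users",
--         "scans",
--         "assets",
--         "asset_dns_records",
--         "discovery_domains",
--         "discovery_ips",
--         "discovery_software",
--         "discovery_ssl",
--         "certificates",
--         "pqc_classification",
--         "cbom_summary",
--         "cbom_entries",
--         "compliance_scores",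
--         "cyber_rating",
--         "findings",
--         "asset_metrics",
--         "org_pqc_metrics",
--         "cert_expiry_buckets",
--         "tls_compliance_scores",
--         "digital_labels",
--         "audit_log_chain",
--         "audit_logs",
--         "report_schedules",
--         "cbom_reports",
--     ]
--     rank = {name: i for i, name in enumerate(preferred)}
--     return sorted(existing, key=lambda t: (rank.get(t, len(preferred)), t))
-- ===== Notes on version B (the rewrite author's own statement) =====
-- stated objective: simpler
-- what changed: Replaces the preferred-filter plus set-difference plus second sort with a single keyed sort: a rank dict maps each preferred name to its index and one sorted() call over the whole set with key (rank.get(t, len(preferred)), t) yields the same order.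
import Mathlib
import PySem

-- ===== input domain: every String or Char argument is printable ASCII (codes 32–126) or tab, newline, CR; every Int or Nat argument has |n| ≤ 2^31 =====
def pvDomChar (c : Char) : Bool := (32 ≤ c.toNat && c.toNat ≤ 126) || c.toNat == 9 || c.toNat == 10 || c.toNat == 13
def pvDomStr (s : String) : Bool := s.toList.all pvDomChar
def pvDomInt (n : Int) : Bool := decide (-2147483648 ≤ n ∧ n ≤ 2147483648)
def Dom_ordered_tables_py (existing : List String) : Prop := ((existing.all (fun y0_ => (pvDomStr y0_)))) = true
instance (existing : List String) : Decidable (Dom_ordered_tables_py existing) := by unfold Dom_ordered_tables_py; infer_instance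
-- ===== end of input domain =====

-- B replaces A's preferred-filter + set-difference + second sort by ONE keyed sort
-- (rank dict, key = (rank.get(t, len(preferred)), t)); objective: simpler.

-- the `preferred` literal both Pythons carry (the same 24-name constant)
def pvPreferred : List String :=
  ["users", "scans", "assets", "asset_dns_records", "discovery_domains",
   "discovery_ips", "discovery_software", "discovery_ssl", "certificates",
   "pqc_classification", "cbom_summary", "cbom_entries", "compliance_scores",
   "cyber_rating", "findings", "asset_metrics", "org_pqc_metrics",
   "cert_expiry_buckets", "tls_compliance_scores", "digital_labels",
   "audit_log_chain", "audit_logs", "report_schedules", "cbom_reports"]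

-- ===== PORT A =====
def ordered_tables_py (existing : List String) : List String :=
  let preferred := pvPreferred
  let ordered := preferred.filter (fun t => PySem.Set.contains existing t)
  ordered ++ PySem.List.sorted (PySem.Set.diff existing (PySem.Set.ofList ordered)) (fun x => x) false

-- ===== PORT B =====
def ordered_tables_py_alt (existing : List String) : List String :=
  let preferred := pvPreferred
  let rank : PySem.Dict String Int :=
    (PySem.List.enumerate preferred 0).foldl (fun d p => d.insert p.2 p.1) PySem.Dict.empty
  PySem.List.sorted2 existing (fun t => rank.getD t (preferred.length : Int)) (fun t => t) false

-- ===== PRECONDITION & SPEC =====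
-- The Python parameter is a set[str]; its List model holds the DISTINCT elements,
-- so Pre_ only states that representation invariant (no input A accepts is excluded).
def Pre_ordered_tables_py (existing : List String) : Prop := existing.Nodup
instance (existing : List String) : Decidable (Pre_ordered_tables_py existing) := by unfold Pre_ordered_tables_py; infer_instance

def pvWitness_ordered_tables_py : List String := ["zeta", "users", "scans", "alpha"]

def Spec_ordered_tables_py (existing : List String) (out : List String) : Prop := out = ordered_tables_py_alt existing
instance (existing : List String) (out : List String) : Decidable (Spec_ordered_tables_py existing out) := by unfold Spec_ordered_tables_py; infer_instance

-- ===== CLAIM (what is proved, stated in full; the proofs are below) =====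
def Claim_equal_ordered_tables_py : Prop := ∀ (existing : List String), Dom_ordered_tables_py existing → Pre_ordered_tables_py existing → Spec_ordered_tables_py existing (ordered_tables_py existing)

-- ===== LEMMAS AND PROOFS =====

-- B's rank dictionary, named for the proofs
def pvRank : PySem.Dict String Int :=
  (PySem.List.enumerate pvPreferred 0).foldl (fun d p => d.insert p.2 p.1) PySem.Dict.empty

lemma pvPreferred_nodup : pvPreferred.Nodup := by decide

lemma pvRank_keys : pvRank.keys = pvPreferred := by decide

lemma pvRank_getD_of_not_mem (t : String) (h : t ∉ pvPreferred) : pvRank.getD t 24 = 24 := by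
  apply PySem.Dict.getD_of_not_contains
  rw [Bool.eq_false_iff]
  intro hc
  exact h (pvRank_keys ▸ (PySem.Dict.contains_iff_mem_keys pvRank t).mp hc)

lemma pvRank_lt_of_mem (t : String) (h : t ∈ pvPreferred) : pvRank.getD t 24 < 24 := by
  have hall : pvPreferred.all (fun t => decide (pvRank.getD t 24 < 24)) = true := by decide
  simpa using (List.all_eq_true.mp hall) t h

lemma pvPreferred_pairwise_rank :
    pvPreferred.Pairwise (fun a b => pvRank.getD a 24 < pvRank.getD b 24) := by decide

-- sorted2 with an Int first key and the string itself as tie-breaker IS sorted by the lexicographic pair key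
lemma sorted2_eq_sorted_lex (xs : List String) (k1 : String → Int) :
    PySem.List.sorted2 xs k1 (fun t => t) false
      = PySem.List.sorted xs (fun t => toLex (k1 t, t)) false := by
  show xs.foldl (fun acc x => PySem.List.insertBy _ x acc) [] = xs.foldl (fun acc x => PySem.List.insertBy _ x acc) []
  congr 1
  funext acc x
  congr 1
  funext a b
  by_cases h1 : k1 a < k1 b
  · simp [h1, Prod.Lex.lt_iff]
  · by_cases h2 : k1 b < k1 a
    · simp [h1, h2, Prod.Lex.lt_iff]
      omega
    · have he : k1 a = k1 b := le_antisymm (not_lt.mp h2) (not_lt.mp h1)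
      simp [he, Prod.Lex.lt_iff]

theorem ordered_tables_py_spec : Claim_equal_ordered_tables_py := by
  intro existing _ hnd
  unfold Spec_ordered_tables_py ordered_tables_py ordered_tables_py_alt
  simp only []
  rw [show ((PySem.List.enumerate pvPreferred 0).foldl (fun d p => d.insert p.2 p.1) PySem.Dict.empty) = pvRank from rfl]
  rw [show ((pvPreferred.length : Int)) = (24 : Int) from by decide]
  rw [sorted2_eq_sorted_lex]
  -- name the pieces of A's result
  set ordered := pvPreferred.filter (fun t => PySem.Set.contains existing t) with hord
  set rest := PySem.Set.diff existing (PySem.Set.ofList ordered) with hrest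
  set S := PySem.List.sorted rest (fun x => x) false with hS
  have hmem_ord : ∀ a, a ∈ ordered ↔ a ∈ pvPreferred ∧ a ∈ existing := by
    intro a
    simp [hord, PySem.Set.contains, List.mem_filter]
  have hmem_rest : ∀ b, b ∈ rest ↔ b ∈ existing ∧ b ∉ ordered := by
    intro b
    simp [hrest, PySem.Set.diff, List.mem_filter, PySem.Set.mem_ofList]
  have hS_perm : S.Perm rest := PySem.List.sorted_perm rest _ false
  have hmem_S : ∀ b, b ∈ S ↔ b ∈ existing ∧ b ∉ ordered := by
    intro b; rw [hS_perm.mem_iff]; exact hmem_rest b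
  have hS_not_pref : ∀ b ∈ S, b ∉ pvPreferred := by
    intro b hb hbp
    obtain ⟨hbe, hbo⟩ := (hmem_S b).mp hb
    exact hbo ((hmem_ord b).mpr ⟨hbp, hbe⟩)
  have hnd_ord : ordered.Nodup := pvPreferred_nodup.filter _
  have hnd_rest : rest.Nodup := hnd.filter _
  have hnd_S : S.Nodup := hS_perm.nodup_iff.mpr hnd_rest
  -- the permutation
  have hperm : (ordered ++ S).Perm existing := by
    rw [List.perm_ext_iff_of_nodup ?_ hnd]
    · intro a
      simp only [List.mem_append, hmem_S, hmem_ord]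
      constructor
      · rintro (⟨_, h⟩ | ⟨h, _⟩) <;> exact h
      · intro h
        by_cases hp : a ∈ ordered
        · exact Or.inl ((hmem_ord a).mp hp)
        · exact Or.inr ⟨h, fun hc => hp ((hmem_ord a).mpr hc)⟩
    · refine List.Nodup.append hnd_ord hnd_S ?_
      intro a ha hb
      exact ((hmem_S a).mp hb).2 ha
  -- the strict pairwise order under the lexicographic key
  have hpair :
      (ordered ++ S).Pairwise
        (fun a b => (toLex (pvRank.getD a 24, a)) < (toLex (pvRank.getD b 24, b))) := by
    rw [List.pairwise_append]
    refine ⟨?_, ?_, ?_⟩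
    · have := pvPreferred_pairwise_rank.filter (fun t => PySem.Set.contains existing t)
      exact this.imp (fun h => Prod.Lex.lt_iff.mpr (Or.inl h))
    · have hle : S.Pairwise (fun a b => a ≤ b) := PySem.List.sorted_pairwise rest _
      have hlt : S.Pairwise (fun a b => a < b) :=
        (hle.and hnd_S).imp (fun ⟨h1, h2⟩ => lt_of_le_of_ne h1 h2)
      refine hlt.imp_of_mem ?_
      intro a b ha hb h
      have h24a : pvRank.getD a 24 = 24 := pvRank_getD_of_not_mem a (hS_not_pref a ha)
      have h24b : pvRank.getD b 24 = 24 := pvRank_getD_of_not_mem b (hS_not_pref b hb)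
      exact Prod.Lex.lt_iff.mpr (Or.inr ⟨by simp [h24a, h24b], h⟩)
    · intro a ha b hb
      have h1 : pvRank.getD a 24 < 24 := pvRank_lt_of_mem a ((hmem_ord a).mp ha).1
      have h2 : pvRank.getD b 24 = 24 := pvRank_getD_of_not_mem b (hS_not_pref b hb)
      exact Prod.Lex.lt_iff.mpr (Or.inl (by simp only [ofLex_toLex]; omega))
  exact (PySem.List.sorted_eq_of_perm_of_pairwise_lt existing (ordered ++ S) _ hperm hpair).symm
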